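-- pv_equiv track=rewrite | github.com/hsutungyu/discord-snooker-bot | engine/score.py | ranking_points
-- ===== SOURCE A (Python) =====
-- def ranking_points(scores: dict[str, int], players: list[str]) -> dict[str, int]:
--     """
--     Convert set scores into ranking points.
--     N players → 1st gets N-1 pts, last gets 0 pt (N-1, N-2, …, 0).
--     Tied players receive the higher rank's points; subsequent ranks are skipped
--     (standard competition / Olympic ranking).
--     """
--     n = len(players)
--     sorted_players = sorted(players, key=lambda p: scores.get(p, 0), reverse=True)
--     result: dict[str, int] = {}
--     rank = 1
--     i = 0
--     while i < n:
--         tied_score = scores.get(sorted_players[i], 0)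
--         j = i + 1
--         while j < n and scores.get(sorted_players[j], 0) == tied_score:
--             j += 1
--         pts = n - rank
--         for k in range(i, j):
--             result[sorted_players[k]] = pts
--         rank += (j - i)
--         i = j
--     return result
-- ===== SOURCE B (Python) =====
-- def ranking_points(scores: dict[str, int], players: list[str]) -> dict[str, int]:
--     """Competition-ranking points: each player gets n-1 minus the number of
--     strictly better players; built by counting, no tie-grouping loop."""
--     n = len(players)
--     order = sorted(players, key=lambda p: scores.get(p, 0), reverse=True)
--     return {
--         p: n - 1 - sum(1 for q in players if scores.get(q, 0) > scores.get(p, 0))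
--         for p in order
--     }
-- ===== Notes on version B (the rewrite author's own statement) =====
-- stated objective: simpler
-- what changed: Replaces A's rank bookkeeping with its tie-grouping inner while-loop by a dict comprehension that gives each player n-1 minus the count of players with a strictly greater score (ties share points automatically).
import Mathlib
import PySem

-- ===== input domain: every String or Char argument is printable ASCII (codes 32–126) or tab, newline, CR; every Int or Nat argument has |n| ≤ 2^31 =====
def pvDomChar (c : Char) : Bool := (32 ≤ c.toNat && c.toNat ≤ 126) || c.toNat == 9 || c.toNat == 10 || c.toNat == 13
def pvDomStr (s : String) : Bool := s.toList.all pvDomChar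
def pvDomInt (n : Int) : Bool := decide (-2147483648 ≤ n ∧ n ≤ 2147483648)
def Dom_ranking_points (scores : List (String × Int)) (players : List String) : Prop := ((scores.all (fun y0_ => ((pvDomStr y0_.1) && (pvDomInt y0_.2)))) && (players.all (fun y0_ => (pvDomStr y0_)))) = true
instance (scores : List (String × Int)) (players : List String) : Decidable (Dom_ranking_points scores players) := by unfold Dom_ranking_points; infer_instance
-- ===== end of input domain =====

-- B replaces A's rank bookkeeping and tie-grouping inner while-loop by directly
-- counting, for each player, the players with a strictly greater score (objective: simpler).

-- ===== PORT A =====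
-- inner while:  while j < n and scores.get(sorted_players[j], 0) == tied_score: j += 1
def rpFindJ (s : List String) (d : PySem.Dict String Int) (n tied j : Int) : Int :=
  if h : j < n ∧ (PySem.Dict.getD d (PySem.List.pyGetD s j "") 0) = tied then
    rpFindJ s d n tied (j + 1)
  else
    j
termination_by (n - j).toNat
decreasing_by omega

-- the port's termination needs this fact about the inner while (cited in decreasing_by)
theorem rpFindJ_ge (s : List String) (d : PySem.Dict String Int) (n tied j : Int) :
    j ≤ rpFindJ s d n tied j := by
  unfold rpFindJ
  split
  · have := rpFindJ_ge s d n tied (j + 1); omega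
  · omega
termination_by (n - j).toNat
decreasing_by omega

-- outer while over groups of tied players
def rpLoop (s : List String) (d : PySem.Dict String Int) (n i rank : Int)
    (result : PySem.Dict String Int) : PySem.Dict String Int :=
  if _h : i < n then
    let tied := PySem.Dict.getD d (PySem.List.pyGetD s i "") 0
    let j := rpFindJ s d n tied (i + 1)
    let pts := n - rank
    let result' := (PySem.List.pyRange i j 1).foldl
      (fun r k => r.insert (PySem.List.pyGetD s k "") pts) result
    rpLoop s d n j (rank + (j - i)) result'
  else
    result
termination_by (n - i).toNat
decreasing_by
  have := rpFindJ_ge s d n (PySem.Dict.getD d (PySem.List.pyGetD s i "") 0) (i + 1)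
  omega

def ranking_points (scores : List (String × Int)) (players : List String) : List (String × Int) :=
  let n : Int := players.length
  let d := PySem.Dict.ofList scores
  let sorted_players := PySem.List.sorted players (fun p => d.getD p 0) true
  (rpLoop sorted_players d n 0 1 PySem.Dict.empty).items

-- ===== PORT B =====
def ranking_points_alt (scores : List (String × Int)) (players : List String) : List (String × Int) :=
  let n : Int := players.length
  let d := PySem.Dict.ofList scores
  let order := PySem.List.sorted players (fun p => d.getD p 0) true
  (order.foldl
    (fun r p => r.insert p
      (n - 1 - (players.map (fun q => if d.getD q 0 > d.getD p 0 then (1 : Int) else 0)).sum))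
    PySem.Dict.empty).items

-- ===== PRECONDITION & SPEC =====
def Spec_ranking_points (scores : List (String × Int)) (players : List String) (out : List (String × Int)) : Prop := out = ranking_points_alt scores players
instance (scores : List (String × Int)) (players : List String) (out : List (String × Int)) : Decidable (Spec_ranking_points scores players out) := by unfold Spec_ranking_points; infer_instance

-- ===== CLAIM (what is proved, stated in full; the proofs are below) =====
def Claim_equal_ranking_points : Prop := ∀ (scores : List (String × Int)) (players : List String), Dom_ranking_points scores players → Spec_ranking_points scores players (ranking_points scores players)

-- ===== LEMMAS AND PROOFS =====

-- characterisation of the inner while-loop: it returns the end of the run of scores equal to tied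
theorem rpFindJ_spec (s : List String) (d : PySem.Dict String Int) (tied : Int)
    (c : Nat) (hc : c ≤ s.length) :
    ∃ b : Nat, rpFindJ s d (s.length : Int) tied (c : Int) = (b : Int) ∧ c ≤ b ∧ b ≤ s.length ∧
      (∀ k : Nat, c ≤ k → k < b → d.getD (s.getD k "") 0 = tied) ∧
      (b < s.length → d.getD (s.getD b "") 0 ≠ tied) := by
  unfold rpFindJ
  rw [PySem.List.pyGetD_natCast]
  split
  case isTrue h =>
    have hc1 : c + 1 ≤ s.length := by omega
    obtain ⟨b, heq, hb1, hb2, hrun, hstop⟩ := rpFindJ_spec s d tied (c + 1) hc1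
    refine ⟨b, ?_, by omega, hb2, ?_, hstop⟩
    · rw [← heq]; push_cast; ring_nf
    · intro k h1 h2
      rcases Nat.eq_or_lt_of_le h1 with rfl | h1'
      · exact h.2
      · exact hrun k h1' h2
  case isFalse h =>
    refine ⟨c, rfl, le_refl _, hc, fun k h1 h2 => by omega, fun hlt => ?_⟩
    intro hEq
    exact h ⟨by exact_mod_cast hlt, hEq⟩
termination_by s.length - c

-- the range-for that assigns pts to the tied group, as a fold over the slice of s
theorem foldl_range_insert (s : List String) (v : Int) (a b : Nat)
    (hab : a ≤ b) (hb : b ≤ s.length) (r : PySem.Dict String Int) :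
    (PySem.List.pyRange (a : Int) (b : Int) 1).foldl
        (fun r k => r.insert (PySem.List.pyGetD s k "") v) r
      = ((s.drop a).take (b - a)).foldl (fun r p => r.insert p v) r := by
  rcases Nat.eq_or_lt_of_le hab with rfl | h
  · have : PySem.List.pyRange (a : Int) (a : Int) 1 = [] := by
      simp [PySem.List.pyRange]
    simp [this]
  · rw [PySem.List.pyRange_one_cons (by exact_mod_cast h)]
    simp only [List.foldl_cons]
    rw [PySem.List.pyGetD_natCast]
    have hcast : (a : Int) + 1 = ((a + 1 : Nat) : Int) := by push_cast; ring
    rw [hcast, foldl_range_insert s v (a + 1) b h hb]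
    have ha' : a < s.length := by omega
    have hdrop : s.drop a = s.getD a "" :: s.drop (a + 1) := by
      rw [List.getD_eq_getElem s "" ha']
      exact List.drop_eq_getElem_cons ha'
    rw [hdrop]
    have hba : b - a = (b - (a + 1)) + 1 := by omega
    rw [hba, List.take_succ_cons, List.foldl_cons]
termination_by b - a

-- outer-loop invariant: once every earlier player strictly outscores the rest,
-- the remaining loop assigns each player n-1-(number of strictly better players)
theorem loop_eq (d : PySem.Dict String Int) (players s : List String)
    (hperm : s.Perm players)
    (hpw : s.Pairwise (fun a b => d.getD b 0 ≤ d.getD a 0))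
    (a : Nat) (ha : a ≤ s.length)
    (hinv : ∀ k m : Nat, (hk : k < a) → (ham : a ≤ m) → (hm : m < s.length) →
        d.getD (s[m]'hm) 0 < d.getD (s[k]'(by omega)) 0)
    (r : PySem.Dict String Int) :
    rpLoop s d (s.length : Int) (a : Int) ((a : Int) + 1) r
      = (s.drop a).foldl
          (fun r p => r.insert p
            ((s.length : Int) - 1 - (players.countP (fun q => d.getD p 0 < d.getD q 0) : Int))) r := by
  rw [rpLoop]
  by_cases hlt : a < s.length
  case neg =>
    have : a = s.length := by omega
    subst this
    rw [dif_neg (by omega), List.drop_length, List.foldl_nil]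
  case pos =>
    rw [dif_pos (by exact_mod_cast hlt)]
    rw [PySem.List.pyGetD_natCast]
    have hc1 : a + 1 ≤ s.length := by omega
    obtain ⟨b, heq, hb1, hb2, hrun, hstop⟩ :=
      rpFindJ_spec s d (d.getD (s.getD a "") 0) (a + 1) hc1
    have hcast : (a : Int) + 1 = ((a + 1 : Nat) : Int) := by push_cast; ring
    simp only [hcast, heq]
    rw [foldl_range_insert s _ a b (by omega) hb2 r]
    have hgrp : ∀ m : ℕ, a ≤ m → (hm2 : m < b) → d.getD (s[m]'(by omega)) 0 = d.getD (s[a]'hlt) 0 := by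
      intro m h1 h2
      rcases Nat.eq_or_lt_of_le h1 with rfl | h1'
      · rfl
      · have := hrun m h1' h2
        rwa [List.getD_eq_getElem s "" (by omega), List.getD_eq_getElem s "" hlt] at this
    have hpwE : ∀ i j : ℕ, (hij : i < j) → (hj : j < s.length) →
        d.getD (s[j]'hj) 0 ≤ d.getD (s[i]'(by omega)) 0 :=
      fun i j hij hj => List.pairwise_iff_getElem.mp hpw i j (by omega) hj hij
    have hb_lt : ∀ hbl : b < s.length, d.getD (s[b]'hbl) 0 < d.getD (s[a]'hlt) 0 := by
      intro hbl
      have h1 := hpwE a b (by omega) hbl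
      have h2 := hstop hbl
      rw [List.getD_eq_getElem s "" hbl, List.getD_eq_getElem s "" hlt] at h2
      exact lt_of_le_of_ne h1 h2
    have hcnt : ∀ m : ℕ, a ≤ m → (hmb : m < b) →
        players.countP (fun q => decide (d.getD (s[m]'(by omega)) 0 < d.getD q 0)) = a := by
      intro m h1 h2
      simp only [hgrp m h1 h2]
      rw [← hperm.countP_eq]
      generalize hT : d.getD (s[a]'hlt) 0 = T
      conv_lhs => rw [← List.take_append_drop a s]
      rw [List.countP_append]
      have hTake : (s.take a).countP (fun q => decide (T < d.getD q 0)) = a := by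
        rw [List.countP_eq_length.mpr ?_, List.length_take, Nat.min_eq_left ha]
        intro q hq
        obtain ⟨i, hi, rfl⟩ := List.mem_iff_getElem.mp hq
        have hi' : i < a := by
          have := List.length_take_le a s
          omega
        simp only [List.getElem_take]
        rw [← hT]
        exact decide_eq_true (hinv i a hi' le_rfl hlt)
      have hDrop : (s.drop a).countP (fun q => decide (T < d.getD q 0)) = 0 := by
        rw [List.countP_eq_zero]
        intro q hq
        obtain ⟨i, hi, rfl⟩ := List.mem_iff_getElem.mp hq
        have hlen : a + i < s.length := by
          simp only [List.length_drop] at hi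
          omega
        simp only [List.getElem_drop, decide_eq_true_eq, not_lt]
        rw [← hT]
        by_cases hcase : a + i < b
        · rw [hgrp (a + i) (by omega) hcase]
        · have hbl : b < s.length := by omega
          have hle : d.getD (s[a + i]'hlen) 0 ≤ d.getD (s[b]'hbl) 0 := by
            rcases Nat.eq_or_lt_of_le (Nat.le_of_not_lt hcase) with heqq | hltt
            · exact le_of_eq (by simp [heqq])
            · exact hpwE b (a + i) hltt hlen
          exact le_of_lt (lt_of_le_of_lt hle (hb_lt hbl))
      rw [hTake, hDrop]
      omega
    have hsplit : s.drop a = (s.drop a).take (b - a) ++ s.drop b := by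
      conv_lhs => rw [← List.take_append_drop (b - a) (s.drop a)]
      rw [List.drop_drop]
      have hsum : a + (b - a) = b := by omega
      rw [hsum]
    conv_rhs => rw [hsplit, List.foldl_append]
    have hfold : ((s.drop a).take (b - a)).foldl
          (fun r k => r.insert k (((s.length : Nat) : Int) - ((a + 1 : Nat) : Int))) r
        = ((s.drop a).take (b - a)).foldl
          (fun r p => r.insert p (((s.length : Nat) : Int) - 1 -
            ((players.countP (fun q => decide (d.getD p 0 < d.getD q 0)) : Nat) : Int))) r := by
      apply PySem.List.foldl_congr_mem
      intro acc p hp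
      obtain ⟨i, hi, rfl⟩ := List.mem_iff_getElem.mp hp
      have hib : a + i < b := by
        simp only [List.length_take, List.length_drop] at hi
        omega
      have hlen2 : a + i < s.length := by omega
      simp only [List.getElem_take, List.getElem_drop]
      rw [hcnt (a + i) (by omega) hib]
      congr 1
      push_cast
      ring
    rw [hfold]
    have hrank : ((a + 1 : Nat) : Int) + ((b : Int) - (a : Int)) = ((b : Int) + 1) := by
      push_cast; ring
    rw [hrank]
    have hinv' : ∀ k m : ℕ, (hk : k < b) → (ham : b ≤ m) → (hm : m < s.length) →
        d.getD (s[m]'hm) 0 < d.getD (s[k]'(by omega)) 0 := by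
      intro k m hk ham hm
      by_cases hka : k < a
      · exact hinv k m hka (by omega) hm
      · have hk' : a ≤ k := by omega
        rw [hgrp k hk' hk]
        calc d.getD (s[m]'hm) 0 ≤ d.getD (s[b]'(by omega)) 0 := by
              rcases Nat.eq_or_lt_of_le ham with heqq | hltt
              · exact le_of_eq (by simp [heqq])
              · exact hpwE b m hltt hm
          _ < d.getD (s[a]'hlt) 0 := hb_lt (by omega)
    exact loop_eq d players s hperm hpw b hb2 hinv' _
termination_by s.length - a

theorem ranking_points_spec : Claim_equal_ranking_points := by
  unfold Claim_equal_ranking_points Spec_ranking_points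
  intro scores players _
  unfold ranking_points ranking_points_alt
  show (rpLoop (PySem.List.sorted players (fun p => (PySem.Dict.ofList scores).getD p 0) true)
        (PySem.Dict.ofList scores) ((players.length : Nat) : Int) 0 1 PySem.Dict.empty).items
      = ((PySem.List.sorted players (fun p => (PySem.Dict.ofList scores).getD p 0) true).foldl
          (fun r p => r.insert p (((players.length : Nat) : Int) - 1 -
            (players.map (fun q =>
              if (PySem.Dict.ofList scores).getD q 0 > (PySem.Dict.ofList scores).getD p 0
              then (1 : Int) else 0)).sum))
          PySem.Dict.empty).items
  set d := PySem.Dict.ofList scores with hd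
  set s := PySem.List.sorted players (fun p => d.getD p 0) true with hs
  have hlen : s.length = players.length := PySem.List.length_sorted players _ true
  have hperm : s.Perm players := PySem.List.sorted_perm players _ true
  have hpw : s.Pairwise (fun a b => d.getD b 0 ≤ d.getD a 0) :=
    PySem.List.sorted_pairwise_rev players _
  congr 1
  have h0 : ((players.length : Nat) : Int) = ((s.length : Nat) : Int) := by exact_mod_cast hlen.symm
  rw [h0]
  have hA := loop_eq d players s hperm hpw 0 (Nat.zero_le _)
    (fun k m hk _ _ => absurd hk (Nat.not_lt_zero k)) PySem.Dict.empty
  simp only [Nat.cast_zero, zero_add, List.drop_zero] at hA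
  rw [hA]
  apply PySem.List.foldl_congr_mem
  intro acc p _
  simp only [gt_iff_lt]
  have hsum := PySem.List.sum_map_ite_one_zero (fun q => decide (d.getD p 0 < d.getD q 0)) players
  simp only [decide_eq_true_eq] at hsum
  rw [hsum]
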